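-- pv_equiv track=rewrite | github.com/adibozzhanov/tut_2025_vadim | problems/xor/bitwise_pairings.py | solve
-- ===== SOURCE A (Python) =====
-- from itertools import product
--
-- def solve(nums1: list[int], nums2: list[int]) -> int:
--     # O(n^2)
--     nums3 = [
--         a ^ b for a,b in list(product(nums1, nums2))
--     ]
--     ans = 0
--     for n in nums3:
--         ans ^= n
--
--     return ans
-- ===== SOURCE B (Python) =====
-- def solve(nums1: list[int], nums2: list[int]) -> int:
--     # Parity counting: each a in nums1 appears len(nums2) times in the pairwise
--     # XORs, each b in nums2 appears len(nums1) times; even repetitions cancel.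
--     x1 = 0
--     for a in nums1:
--         x1 ^= a
--     x2 = 0
--     for b in nums2:
--         x2 ^= b
--     return (x1 if len(nums2) % 2 == 1 else 0) ^ (x2 if len(nums1) % 2 == 1 else 0)
-- ===== Notes on version B (the rewrite author's own statement) =====
-- stated objective: faster
-- what changed: Replaces the O(n*m) XOR over the full cartesian product by parity counting: each element of one list occurs len(other) times, so even repetition counts cancel and the answer is built from the two lists' XOR-folds and length parities.
import Mathlib
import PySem

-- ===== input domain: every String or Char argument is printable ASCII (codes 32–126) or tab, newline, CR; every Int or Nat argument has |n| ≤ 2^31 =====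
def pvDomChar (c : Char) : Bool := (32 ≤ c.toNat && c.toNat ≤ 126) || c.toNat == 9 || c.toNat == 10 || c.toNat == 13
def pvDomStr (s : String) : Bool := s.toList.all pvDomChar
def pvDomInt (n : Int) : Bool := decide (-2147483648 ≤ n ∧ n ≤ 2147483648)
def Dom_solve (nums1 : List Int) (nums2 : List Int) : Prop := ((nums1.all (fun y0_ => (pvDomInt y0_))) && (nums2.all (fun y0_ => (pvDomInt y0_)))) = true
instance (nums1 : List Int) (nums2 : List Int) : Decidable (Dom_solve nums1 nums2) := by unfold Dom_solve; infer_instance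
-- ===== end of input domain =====

-- B replaces A's O(n*m) XOR over the full cartesian product by an O(n+m)
-- parity count: each element of one list occurs len(other) times and even
-- repetitions cancel under XOR.

-- ===== PORT A =====
-- nums3 = [a ^ b for a,b in product(nums1, nums2)]; then fold 'ans ^= n'.
def solve (nums1 : List Int) (nums2 : List Int) : Int :=
  let nums3 := nums1.flatMap (fun a => nums2.map (fun b => PySem.Int.bxor a b))
  nums3.foldl (fun ans n => PySem.Int.bxor ans n) 0

-- ===== PORT B =====
-- x1 = XOR-fold of nums1, x2 = XOR-fold of nums2; combine by length parities.
def solve_alt (nums1 : List Int) (nums2 : List Int) : Int :=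
  let x1 := nums1.foldl (fun x a => PySem.Int.bxor x a) 0
  let x2 := nums2.foldl (fun x b => PySem.Int.bxor x b) 0
  PySem.Int.bxor (if nums2.length % 2 == 1 then x1 else 0)
                 (if nums1.length % 2 == 1 then x2 else 0)

-- ===== PRECONDITION & SPEC =====
def Spec_solve (nums1 : List Int) (nums2 : List Int) (out : Int) : Prop := out = solve_alt nums1 nums2
instance (nums1 : List Int) (nums2 : List Int) (out : Int) : Decidable (Spec_solve nums1 nums2 out) := by unfold Spec_solve; infer_instance

-- ===== CLAIM (what is proved, stated in full; the proofs are below) =====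
def Claim_equal_solve : Prop := ∀ (nums1 : List Int) (nums2 : List Int), Dom_solve nums1 nums2 → Spec_solve nums1 nums2 (solve nums1 nums2)

-- ===== LEMMAS AND PROOFS =====

-- bxor agrees with Mathlib's Int.xor (constructor-wise).
theorem pv_bxor_eq_xor (a b : Int) : PySem.Int.bxor a b = Int.xor a b := by
  cases a <;> cases b <;>
    simp [PySem.Int.bxor, Int.xor, Int.negSucc_eq] <;> omega

theorem pv_bxor_assoc (a b c : Int) :
    PySem.Int.bxor (PySem.Int.bxor a b) c = PySem.Int.bxor a (PySem.Int.bxor b c) := by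
  simp only [pv_bxor_eq_xor]
  cases a <;> cases b <;> cases c <;>
    simp [Int.xor, Nat.xor_assoc]

theorem pv_zero_bxor (a : Int) : PySem.Int.bxor 0 a = a := by
  rw [PySem.Int.bxor_comm]; exact PySem.Int.bxor_zero a

theorem pv_bxor_left_comm (a b c : Int) :
    PySem.Int.bxor a (PySem.Int.bxor b c) = PySem.Int.bxor b (PySem.Int.bxor a c) := by
  rw [← pv_bxor_assoc, PySem.Int.bxor_comm a b, pv_bxor_assoc]

theorem pv_bxor_cancel (a c : Int) : PySem.Int.bxor a (PySem.Int.bxor a c) = c := by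
  rw [← pv_bxor_assoc, PySem.Int.bxor_self, pv_zero_bxor]

-- the XOR-fold, and its basic algebra
def xorFold (l : List Int) : Int := l.foldl (fun x y => PySem.Int.bxor x y) 0

theorem foldl_bxor_init (l : List Int) (i : Int) :
    l.foldl (fun x y => PySem.Int.bxor x y) i = PySem.Int.bxor i (xorFold l) := by
  induction l generalizing i with
  | nil => simp [xorFold, PySem.Int.bxor_zero]
  | cons h t ih =>
      simp only [xorFold, List.foldl_cons]
      rw [ih, ih (PySem.Int.bxor 0 h), pv_zero_bxor, pv_bxor_assoc]

theorem xorFold_cons (x : Int) (l : List Int) :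
    xorFold (x :: l) = PySem.Int.bxor x (xorFold l) := by
  simp only [xorFold, List.foldl_cons, pv_zero_bxor]
  exact foldl_bxor_init l x

theorem xorFold_append (l1 l2 : List Int) :
    xorFold (l1 ++ l2) = PySem.Int.bxor (xorFold l1) (xorFold l2) := by
  simp only [xorFold, List.foldl_append]
  exact foldl_bxor_init l2 _

-- XOR of (a ^ b) over all b in l: a survives iff l has odd length.
theorem xorFold_map_bxor (a : Int) (l : List Int) :
    xorFold (l.map (fun b => PySem.Int.bxor a b))
      = PySem.Int.bxor (if l.length % 2 == 1 then a else 0) (xorFold l) := by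
  induction l with
  | nil => simp [xorFold]
  | cons h t ih =>
      rw [List.map_cons, xorFold_cons, ih, xorFold_cons]
      by_cases hp : t.length % 2 = 1
      · simp [hp, List.length_cons, show (t.length + 1) % 2 = 0 by omega,
              pv_bxor_assoc, pv_bxor_left_comm, pv_bxor_cancel, pv_zero_bxor]
      · simp [List.length_cons, show ¬ t.length % 2 = 1 by omega,
              show (t.length + 1) % 2 = 1 by omega,
              pv_bxor_assoc, pv_zero_bxor]

-- main invariant: A's full-product XOR equals B's parity formula
theorem xorFold_flatMap (n1 n2 : List Int) :
    xorFold (n1.flatMap (fun a => n2.map (fun b => PySem.Int.bxor a b)))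
      = PySem.Int.bxor (if n2.length % 2 == 1 then xorFold n1 else 0)
                       (if n1.length % 2 == 1 then xorFold n2 else 0) := by
  induction n1 with
  | nil => simp [xorFold]
  | cons a t ih =>
      rw [List.flatMap_cons, xorFold_append, xorFold_map_bxor, ih, xorFold_cons]
      by_cases hp : t.length % 2 = 1
      · by_cases hq : n2.length % 2 = 1 <;>
          simp [hp, hq, List.length_cons, show (t.length + 1) % 2 = 0 by omega,
                pv_bxor_assoc, pv_bxor_left_comm, pv_bxor_cancel, pv_zero_bxor,
                PySem.Int.bxor_zero, PySem.Int.bxor_comm]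
      · by_cases hq : n2.length % 2 = 1 <;>
          simp [hp, hq, List.length_cons, show (t.length + 1) % 2 = 1 by omega,
                pv_bxor_assoc, pv_bxor_left_comm, pv_bxor_cancel, pv_zero_bxor,
                PySem.Int.bxor_zero, PySem.Int.bxor_comm]

-- ===== VERDICT (by name: the statement is the Claim_ definition above) =====
theorem solve_spec : Claim_equal_solve := by
  intro nums1 nums2 _
  unfold Spec_solve solve solve_alt
  simpa [xorFold] using xorFold_flatMap nums1 nums2
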